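-- pv_equiv track=rewrite | github.com/Cangooroo/Eloadok-klaszterezese | main.py | restoreartists
-- ===== SOURCE A (Python) =====
-- def restoreartists(clusters, expandeddataset): #vissza kéne hozni hogy melyik vektor melyik előadó, erre mondjuk gondolhattam volna hamarabb...
--     returnset = []
--     for x in range(0, len(clusters)):
--         returnset.append([])
--     for x in expandeddataset:
--         for y in range(0, len(clusters)):
--             if x[1] in clusters[y]:
--                 returnset[y].append(x[0])
--     return returnset
-- ===== SOURCE B (Python) =====
-- def restoreartists(clusters, expandeddataset):
--     index = {}
--     for i, cl in enumerate(clusters):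
--         for v in set(cl):
--             index.setdefault(v, []).append(i)
--     rows = [[] for _ in clusters]
--     for name, v in expandeddataset:
--         for i in index.get(v, []):
--             rows[i].append(name)
--     return rows
-- ===== Notes on version B (the rewrite author's own statement) =====
-- stated objective: faster
-- what changed: B builds an inverted index (dict id -> list of cluster indices) once, then makes a single pass over the dataset appending each name only to its matching rows, instead of A's scan of every cluster list for every dataset item.
import Mathlib
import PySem

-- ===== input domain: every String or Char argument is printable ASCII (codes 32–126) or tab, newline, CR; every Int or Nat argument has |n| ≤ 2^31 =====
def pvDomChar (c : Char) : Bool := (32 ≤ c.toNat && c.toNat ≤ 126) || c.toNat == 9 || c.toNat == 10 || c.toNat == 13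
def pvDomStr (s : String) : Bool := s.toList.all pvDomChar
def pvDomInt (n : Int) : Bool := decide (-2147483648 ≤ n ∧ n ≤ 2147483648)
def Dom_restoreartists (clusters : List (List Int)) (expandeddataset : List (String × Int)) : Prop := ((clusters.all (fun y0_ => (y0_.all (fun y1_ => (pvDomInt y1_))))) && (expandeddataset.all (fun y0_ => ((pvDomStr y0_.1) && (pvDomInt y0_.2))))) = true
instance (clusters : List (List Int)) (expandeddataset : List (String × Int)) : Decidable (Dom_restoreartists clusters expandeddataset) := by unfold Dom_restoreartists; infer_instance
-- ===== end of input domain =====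

-- B builds an inverted index id -> cluster indices once and distributes each dataset item in a
-- single pass, replacing A's scan of every cluster per item (objective: faster). No mutation.

-- ===== PORT A =====
def restoreartists (clusters : List (List Int)) (expandeddataset : List (String × Int)) : List (List String) :=
  -- returnset = []; for x in range(0, len(clusters)): returnset.append([])
  let returnset : List (List String) :=
    (PySem.List.pyRange 0 (clusters.length : Int) 1).foldl (fun rs _ => rs ++ [[]]) []
  -- for x in expandeddataset: for y in range(0, len(clusters)): if x[1] in clusters[y]: returnset[y].append(x[0])
  -- y ranges over 0..len(clusters)-1, so clusters[y] / returnset[y] are always in range: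
  -- the total pyGetD / pySetD forms are exact here
  expandeddataset.foldl (fun rs x =>
    (PySem.List.pyRange 0 (clusters.length : Int) 1).foldl (fun rs y =>
      if x.2 ∈ PySem.List.pyGetD clusters y [] then
        PySem.List.pySetD rs y (PySem.List.pyGetD rs y [] ++ [x.1])
      else rs) rs) returnset

-- ===== PORT B =====
def restoreartists_alt (clusters : List (List Int)) (expandeddataset : List (String × Int)) : List (List String) :=
  -- index = {}; for i, cl in enumerate(clusters): for v in set(cl): index.setdefault(v, []).append(i)
  let index : PySem.Dict Int (List Int) :=
    (PySem.List.enumerate clusters 0).foldl (fun d p =>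
      (PySem.Set.ofList p.2).foldl (fun d v =>
        PySem.Dict.modify d v [] (fun l => l ++ [p.1])) d) PySem.Dict.empty
  -- rows = [[] for _ in clusters]
  let rows : List (List String) := clusters.map (fun _ => ([] : List String))
  -- for name, v in expandeddataset: for i in index.get(v, []): rows[i].append(name)
  -- every index i stored in the dict satisfies 0 ≤ i < len(clusters) = len(rows), so the total
  -- pyGetD / pySetD forms are exact here
  expandeddataset.foldl (fun rows x =>
    (PySem.Dict.getD index x.2 []).foldl (fun rows i =>
      PySem.List.pySetD rows i (PySem.List.pyGetD rows i [] ++ [x.1])) rows) rows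

-- ===== PRECONDITION & SPEC =====
def Spec_restoreartists (clusters : List (List Int)) (expandeddataset : List (String × Int)) (out : List (List String)) : Prop := out = restoreartists_alt clusters expandeddataset
instance (clusters : List (List Int)) (expandeddataset : List (String × Int)) (out : List (List String)) : Decidable (Spec_restoreartists clusters expandeddataset out) := by unfold Spec_restoreartists; infer_instance

-- ===== CLAIM (what is proved, stated in full; the proofs are below) =====
def Claim_equal_restoreartists : Prop := ∀ (clusters : List (List Int)) (expandeddataset : List (String × Int)), Dom_restoreartists clusters expandeddataset → Spec_restoreartists clusters expandeddataset (restoreartists clusters expandeddataset)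

-- ===== LEMMAS AND PROOFS =====

-- the y-th output row: first components of dataset items whose id lies in cluster y, in dataset order
def pvRow (ds : List (String × Int)) (cl : List Int) : List String :=
  (ds.filter (fun x => decide (x.2 ∈ cl))).map (fun x => x.1)

-- the indices (from offset m) of the clusters containing v, in increasing order
def pvIdx (v : Int) : List (List Int) → ℕ → List Int
  | [], _ => []
  | cl :: cls, m => (if v ∈ cl then [(m : Int)] else []) ++ pvIdx v cls (m + 1)

-- A's inner-loop body
def pvUpd (clusters : List (List Int)) (x : String × Int) (rs : List (List String)) (y : Int) : List (List String) :=
  if x.2 ∈ PySem.List.pyGetD clusters y [] then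
    PySem.List.pySetD rs y (PySem.List.pyGetD rs y [] ++ [x.1])
  else rs

-- B's row-update body
def pvApp (name : String) (rs : List (List String)) (i : Int) : List (List String) :=
  PySem.List.pySetD rs i (PySem.List.pyGetD rs i [] ++ [name])

lemma pvInit (l : List Int) : ∀ (acc : List (List String)),
    l.foldl (fun rs _ => rs ++ [[]]) acc = acc ++ List.replicate l.length ([] : List String) := by
  induction l with
  | nil => simp
  | cons a l ih =>
    intro acc
    rw [List.foldl_cons, ih]
    simp [List.replicate_succ]

lemma pvZipComp (f g : List String → List Int → List String) :
    ∀ (xs : List (List String)) (ys : List (List Int)),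
    List.zipWith f (List.zipWith g xs ys) ys = List.zipWith (fun a b => f (g a b) b) xs ys := by
  intro xs
  induction xs with
  | nil => intro ys; simp
  | cons x xs ih => intro ys; cases ys with
    | nil => simp
    | cons y ys => simp [ih]

lemma pvZipFst : ∀ (xs : List (List String)) (ys : List (List Int)), xs.length = ys.length →
    List.zipWith (fun a _ => a) xs ys = xs := by
  intro xs
  induction xs with
  | nil => intro ys _; simp
  | cons x xs ih => intro ys h; cases ys with
    | nil => simp at h
    | cons y ys => simp at h; simp [ih ys h]

lemma pvInner (clusters : List (List Int)) (x : String × Int) :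
    ∀ (k m : ℕ) (rs : List (List String)), m + k = clusters.length → rs.length = clusters.length →
    (PySem.List.pyRange (m : Int) (clusters.length : Int) 1).foldl (pvUpd clusters x) rs
      = rs.take m ++ List.zipWith (fun r cl => r ++ if x.2 ∈ cl then [x.1] else [])
          (rs.drop m) (clusters.drop m) := by
  intro k
  induction k with
  | zero =>
    intro m rs hm hr
    have hm' : m = clusters.length := by omega
    subst hm'
    rw [PySem.List.pyRange_one_eq_nil (by omega)]
    simp [List.drop_of_length_le (le_of_eq hr), List.take_of_length_le (le_of_eq hr)]
  | succ k ih =>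
    intro m rs hm hr
    have hmlt : m < clusters.length := by omega
    rw [PySem.List.pyRange_one_cons (by exact_mod_cast hmlt)]
    rw [List.foldl_cons]
    have hcast : ((m : Int) + 1) = ((m + 1 : ℕ) : Int) := by push_cast; ring
    rw [hcast]
    have hrm : m < rs.length := by omega
    have hupd : pvUpd clusters x rs (m : Int)
        = if x.2 ∈ clusters[m] then rs.set m (rs[m] ++ [x.1]) else rs := by
      simp [pvUpd, List.getD_eq_getElem?_getD, List.getElem?_eq_getElem hmlt,
        List.getElem?_eq_getElem hrm]
    rw [hupd]
    rw [List.drop_eq_getElem_cons hrm, List.drop_eq_getElem_cons hmlt, List.zipWith_cons_cons]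
    by_cases hmem : x.2 ∈ clusters[m]
    · simp only [hmem, if_true]
      rw [ih (m + 1) _ (by omega) (by simp [hr])]
      have ht : (rs.set m (rs[m] ++ [x.1])).take (m + 1) = rs.take m ++ [rs[m] ++ [x.1]] := by
        rw [List.take_set]
        rw [List.set_eq_take_append_cons_drop,
          if_pos (by simp [List.length_take]; omega : m < (rs.take (m + 1)).length)]
        rw [List.take_take, Nat.min_eq_left (by omega), List.drop_take]
        simp
      have hd : (rs.set m (rs[m] ++ [x.1])).drop (m + 1) = rs.drop (m + 1) := by
        rw [List.drop_set, if_pos (by omega)]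
      rw [ht, hd, List.append_assoc]
      simp
    · simp only [hmem, if_false]
      rw [ih (m + 1) rs (by omega) hr]
      have ht : rs.take (m + 1) = rs.take m ++ [rs[m]] := by
        rw [List.take_add_one, List.getElem?_eq_getElem hrm]
        rfl
      rw [ht, List.append_assoc]
      simp

lemma pvInner0 (clusters : List (List Int)) (x : String × Int) (rs : List (List String))
    (hr : rs.length = clusters.length) :
    (PySem.List.pyRange 0 (clusters.length : Int) 1).foldl (pvUpd clusters x) rs
      = List.zipWith (fun r cl => r ++ if x.2 ∈ cl then [x.1] else []) rs clusters := by
  have h := pvInner clusters x clusters.length 0 rs (by omega) hr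
  simpa using h

-- one set-fold of B's index-building loop touches key v at most once
lemma pvBuild1 (j : Int) : ∀ (s : List Int), s.Nodup → ∀ (d : PySem.Dict Int (List Int)) (v : Int),
    (s.foldl (fun d w => PySem.Dict.modify d w [] (fun l => l ++ [j])) d).getD v []
      = d.getD v [] ++ (if v ∈ s then [j] else []) := by
  intro s
  induction s with
  | nil => intro _ d v; simp
  | cons w s ih =>
    intro hnd d v
    have hw : w ∉ s := (List.nodup_cons.mp hnd).1
    rw [List.foldl_cons, ih (List.nodup_cons.mp hnd).2, PySem.Dict.getD_modify]
    by_cases hv : v = w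
    · subst hv
      simp [hw]
    · by_cases hvs : v ∈ s <;> simp [hvs, hv]

-- the built index maps v to exactly the indices of the clusters containing v, in order
lemma pvBuild (v : Int) : ∀ (cls : List (List Int)) (m : ℕ) (d : PySem.Dict Int (List Int)),
    ((PySem.List.enumerate cls (m : Int)).foldl (fun d p =>
        (PySem.Set.ofList p.2).foldl (fun d w =>
          PySem.Dict.modify d w [] (fun l => l ++ [p.1])) d) d).getD v []
      = d.getD v [] ++ pvIdx v cls m := by
  intro cls
  induction cls with
  | nil => intro m d; simp [pvIdx]
  | cons cl cls ih =>
    intro m d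
    rw [PySem.List.enumerate_cons, List.foldl_cons]
    have hcast : ((m : Int) + 1) = ((m + 1 : ℕ) : Int) := by push_cast; ring
    rw [hcast, ih (m + 1)]
    rw [pvBuild1 (m : Int) (PySem.Set.ofList cl) (PySem.Set.nodup_ofList cl) d v]
    simp [pvIdx, PySem.Set.mem_ofList, List.append_assoc]

-- folding B's row update over the membership-index list equals the per-cluster zipWith step
lemma pvIdxFold (name : String) (v : Int) :
    ∀ (cls : List (List Int)) (m : ℕ) (rs : List (List String)), rs.length = m + cls.length →
    (pvIdx v cls m).foldl (pvApp name) rs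
      = rs.take m ++ List.zipWith (fun r cl => r ++ if v ∈ cl then [name] else [])
          (rs.drop m) cls := by
  intro cls
  induction cls with
  | nil =>
    intro m rs hr
    simp only [List.length_nil, Nat.add_zero] at hr
    simp [pvIdx, List.drop_of_length_le (le_of_eq hr), List.take_of_length_le (le_of_eq hr)]
  | cons cl cls ih =>
    intro m rs hr
    have hrm : m < rs.length := by simp at hr; omega
    rw [pvIdx, List.foldl_append]
    rw [List.drop_eq_getElem_cons hrm, List.zipWith_cons_cons]
    by_cases hmem : v ∈ cl
    · simp only [hmem, if_true, List.foldl_cons, List.foldl_nil]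
      have happ : pvApp name rs (m : Int) = rs.set m (rs[m] ++ [name]) := by
        simp [pvApp, List.getD_eq_getElem?_getD, List.getElem?_eq_getElem hrm]
      rw [happ, ih (m + 1) _ (by simp at hr ⊢; omega)]
      have ht : (rs.set m (rs[m] ++ [name])).take (m + 1) = rs.take m ++ [rs[m] ++ [name]] := by
        rw [List.take_set]
        rw [List.set_eq_take_append_cons_drop,
          if_pos (by simp [List.length_take]; omega : m < (rs.take (m + 1)).length)]
        rw [List.take_take, Nat.min_eq_left (by omega), List.drop_take]
        simp
      have hd : (rs.set m (rs[m] ++ [name])).drop (m + 1) = rs.drop (m + 1) := by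
        rw [List.drop_set, if_pos (by omega)]
      rw [ht, hd, List.append_assoc]
      simp
    · simp only [hmem, if_false, List.foldl_nil]
      rw [ih (m + 1) rs (by simp at hr; omega)]
      have ht : rs.take (m + 1) = rs.take m ++ [rs[m]] := by
        rw [List.take_add_one, List.getElem?_eq_getElem hrm]
        rfl
      rw [ht, List.append_assoc]
      simp

-- common outer loop: any inner step acting as the per-cluster zipWith append
lemma pvOuterGen (clusters : List (List Int)) (f : List (List String) → (String × Int) → List (List String))
    (hf : ∀ (x : String × Int) (rs : List (List String)), rs.length = clusters.length →
      f rs x = List.zipWith (fun r cl => r ++ if x.2 ∈ cl then [x.1] else []) rs clusters) :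
    ∀ (ds : List (String × Int)) (rs : List (List String)), rs.length = clusters.length →
    ds.foldl f rs = List.zipWith (fun r cl => r ++ pvRow ds cl) rs clusters := by
  intro ds
  induction ds with
  | nil =>
    intro rs hr
    simp only [List.foldl_nil, pvRow, List.filter_nil, List.map_nil, List.append_nil]
    exact (pvZipFst rs clusters hr).symm
  | cons x ds ih =>
    intro rs hr
    rw [List.foldl_cons, hf x rs hr]
    rw [ih _ (by simp [hr])]
    rw [pvZipComp]
    congr 1
    funext r cl
    by_cases hm : x.2 ∈ cl <;> simp [pvRow, hm]

lemma pvZipReplicate (ds : List (String × Int)) :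
    ∀ (ys : List (List Int)),
    List.zipWith (fun r cl => r ++ pvRow ds cl) (List.replicate ys.length ([] : List String)) ys
      = ys.map (fun cl => pvRow ds cl) := by
  intro ys
  induction ys with
  | nil => simp
  | cons y ys ih => simp [List.replicate_succ, ih]

lemma pvA (clusters : List (List Int)) (ds : List (String × Int)) :
    restoreartists clusters ds = clusters.map (fun cl => pvRow ds cl) := by
  unfold restoreartists
  rw [pvInit]
  simp only [List.nil_append, PySem.List.length_pyRange_one]
  have hlen : ((clusters.length : Int) - 0).toNat = clusters.length := by omega
  rw [hlen]
  exact (pvOuterGen clusters _ (fun x rs hr => pvInner0 clusters x rs hr) ds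
      (List.replicate clusters.length []) (by simp)).trans
    (by simpa using pvZipReplicate ds clusters)

lemma pvAlt (clusters : List (List Int)) (ds : List (String × Int)) :
    restoreartists_alt clusters ds = clusters.map (fun cl => pvRow ds cl) := by
  unfold restoreartists_alt
  simp only []
  refine (pvOuterGen clusters _ ?_ ds (clusters.map fun _ => []) (by simp)).trans ?_
  · intro x rs hr
    have hb := pvBuild x.2 clusters 0 PySem.Dict.empty
    simp only [Nat.cast_zero] at hb
    rw [hb, PySem.Dict.getD_empty, List.nil_append]
    have h := pvIdxFold x.1 x.2 clusters 0 rs (by omega)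
    simpa [pvApp] using h
  · have : (clusters.map fun _ => ([] : List String)) = List.replicate clusters.length [] := by
      simp [List.map_const']
    rw [this]
    simpa using pvZipReplicate ds clusters

-- ===== VERDICT (by name: the statement is the Claim_ definition above) =====
theorem restoreartists_spec : Claim_equal_restoreartists := by
  intro clusters ds _
  unfold Spec_restoreartists
  rw [pvA, pvAlt]
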